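-- pv_equiv track=rewrite | github.com/vivek07kumar/Prime-number-calculator-using-Sieve-of-Eratosthenes | Prime number calculator using Sieve of Eratosthenes.py | prime_numbers_finder
-- ===== SOURCE A (Python) =====
-- def prime_numbers_finder(par1,par2,par3) :
--     list1 = par3[:]
--     for diviser in range(2,par2+1,1) :
--         index = 0
--         for dividend in list1 :
--             if dividend != 0 :
--                 if diviser < dividend :
--                     remainder = dividend % diviser
--                     if remainder == 0 :
--                         list1[index] = 0
--             index = index + 1
--     result = []
--     for x1 in list1 :
--         if x1 > 1 :
--             result = result + [x1]
--     return result
-- ===== SOURCE B (Python) =====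
-- def prime_numbers_finder(par1, par2, par3):
--     # One pass: keep x > 1 with no divisor d, 2 <= d <= par2, d < x.
--     # Such a divisor exists iff one exists with d*d <= x, so trial division
--     # stops at min(par2, sqrt(x)) instead of scanning all of range(2, par2+1).
--     result = []
--     for x in par3:
--         if x > 1:
--             keep = True
--             d = 2
--             while d <= par2 and d * d <= x:
--                 if x % d == 0:
--                     keep = False
--                     break
--                 d = d + 1
--             if keep:
--                 result.append(x)
--     return result
-- ===== Notes on version B (the rewrite author's own statement) =====
-- stated objective: faster
-- what changed: A scans every divisor in range(2, par2+1) over the whole list, zeroing composites in a copy and then filtering; B makes one pass over the list and trial-divides each element only up to min(par2, sqrt(x)) with an early break, since a divisor d<=par2 with d<x exists iff one with d*d<=x does.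
import Mathlib
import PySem

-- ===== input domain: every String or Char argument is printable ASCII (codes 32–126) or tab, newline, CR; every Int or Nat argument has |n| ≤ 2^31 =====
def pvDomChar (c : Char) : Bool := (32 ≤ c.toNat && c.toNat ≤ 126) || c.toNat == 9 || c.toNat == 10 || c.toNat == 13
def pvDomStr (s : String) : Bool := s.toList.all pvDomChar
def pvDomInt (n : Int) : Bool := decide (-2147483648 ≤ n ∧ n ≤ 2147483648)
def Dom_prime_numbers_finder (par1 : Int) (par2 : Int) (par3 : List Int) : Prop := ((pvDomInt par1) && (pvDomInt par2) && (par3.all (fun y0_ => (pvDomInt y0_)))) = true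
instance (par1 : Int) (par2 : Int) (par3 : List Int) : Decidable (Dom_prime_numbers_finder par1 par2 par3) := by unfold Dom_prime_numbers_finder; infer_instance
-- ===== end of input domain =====

-- B replaces A's per-divisor zeroing sweep (range(2,par2+1) × whole list) by one pass
-- with per-element trial division stopped at min(par2, sqrt x); objective: faster.

-- ===== PORT A =====
-- Python's inner 'for dividend in list1' iterates the live list while assigning
-- list1[index] = 0; each assignment touches only the position just read, so folding
-- over the loop-entry snapshot while threading the mutated list is exact.
def pvInnerA (diviser : Int) : List Int → Nat → List Int → List Int
  | [], _, list1 => list1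
  | dividend :: rest, index, list1 =>
      let list1' :=
        if dividend ≠ 0 then
          if diviser < dividend then
            if PySem.Int.mod dividend diviser = 0 then list1.set index 0 else list1
          else list1
        else list1
      pvInnerA diviser rest (index + 1) list1'

def prime_numbers_finder (par1 : Int) (par2 : Int) (par3 : List Int) : List Int :=
  let list1 := par3
  let list1 := (PySem.List.pyRange 2 (par2 + 1) 1).foldl (fun l diviser => pvInnerA diviser l 0 l) list1
  list1.foldl (fun result x1 => if x1 > 1 then result ++ [x1] else result) []

-- ===== PORT B =====
-- the 'while d <= par2 and d*d <= x' loop of Source B; 'break' = returning false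
def pvTrial (par2 x d : Int) : Bool :=
  if h : d ≤ par2 ∧ d * d ≤ x then
    if PySem.Int.mod x d = 0 then false
    else pvTrial par2 x (d + 1)
  else true
termination_by (x + 1 - d).toNat
decreasing_by
  have hdx : d ≤ x := by
    by_cases h0 : d ≤ 0
    · nlinarith [h.2]
    · nlinarith [h.2]
  omega

def prime_numbers_finder_alt (par1 : Int) (par2 : Int) (par3 : List Int) : List Int :=
  par3.foldl (fun result x =>
    if x > 1 then
      if pvTrial par2 x 2 then result ++ [x] else result
    else result) []

-- ===== PRECONDITION & SPEC =====
def Spec_prime_numbers_finder (par1 : Int) (par2 : Int) (par3 : List Int) (out : List Int) : Prop := out = prime_numbers_finder_alt par1 par2 par3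
instance (par1 : Int) (par2 : Int) (par3 : List Int) (out : List Int) : Decidable (Spec_prime_numbers_finder par1 par2 par3 out) := by unfold Spec_prime_numbers_finder; infer_instance

-- ===== CLAIM (what is proved, stated in full; the proofs are below) =====
def Claim_equal_prime_numbers_finder : Prop := ∀ (par1 : Int) (par2 : Int) (par3 : List Int), Dom_prime_numbers_finder par1 par2 par3 → Spec_prime_numbers_finder par1 par2 par3 (prime_numbers_finder par1 par2 par3)

-- ===== LEMMAS AND PROOFS =====

def pvZ1 (d x : Int) : Int :=
  if x ≠ 0 ∧ d < x ∧ PySem.Int.mod x d = 0 then 0 else x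
lemma set_take_succ (L : List Int) (i : Nat) (hi : i < L.length) :
    (L.set i 0).take (i + 1) = L.take i ++ [0] := by
  induction L generalizing i with
  | nil => simp at hi
  | cons a t ih =>
    cases i with
    | zero => simp
    | succ j =>
      simp only [List.set_cons_succ, List.take_succ_cons, List.cons_append]
      rw [ih j (by simpa using hi)]
lemma set_drop_succ (L : List Int) (i : Nat) :
    (L.set i 0).drop (i + 1) = L.drop (i + 1) := by
  induction L generalizing i with
  | nil => simp
  | cons a t ih =>
    cases i with
    | zero => simp
    | succ j =>
      simp only [List.set_cons_succ, List.drop_succ_cons]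
      exact ih j
lemma pvInnerA_eq_map (d : Int) :
    ∀ (l : List Int) (i : Nat) (L : List Int), L.drop i = l →
      pvInnerA d l i L = L.take i ++ l.map (pvZ1 d) := by
  intro l
  induction l with
  | nil =>
    intro i L hL
    have : L.length ≤ i := by
      by_contra hlt
      have := List.drop_eq_nil_iff.mp hL
      omega
    simp [pvInnerA, List.take_of_length_le this]
  | cons dividend rest ih =>
    intro i L hL
    have hi : i < L.length := by
      by_contra hge
      rw [List.drop_eq_nil_of_le (by omega)] at hL
      exact List.cons_ne_nil _ _ hL.symm
    have hLi : L[i]? = some dividend := by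
      have : (L.drop i)[0]? = L[i+0]? := List.getElem?_drop
      rw [hL] at this; simpa using this.symm
    have hdrop : L.drop (i+1) = rest := by
      have := congrArg (List.drop 1) hL
      simpa [List.drop_drop] using this
    have htake : L.take (i+1) = L.take i ++ [dividend] := by
      rw [List.take_add_one, hLi]; rfl
    show pvInnerA d (dividend :: rest) i L = _
    rw [pvInnerA]
    by_cases h0 : dividend ≠ 0
    · by_cases h1 : d < dividend
      · by_cases h2 : PySem.Int.mod dividend d = 0
        · rw [if_pos h0, if_pos h1, if_pos h2]
          rw [ih (i+1) (L.set i 0) (by rw [set_drop_succ]; exact hdrop)]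
          rw [set_take_succ L i hi]
          simp [pvZ1, h0, h1, h2]
        · rw [if_pos h0, if_pos h1, if_neg h2]
          rw [ih (i+1) L hdrop, htake]
          simp [pvZ1, h2]
      · rw [if_pos h0, if_neg h1]
        rw [ih (i+1) L hdrop, htake]
        simp [pvZ1, h1]
    · rw [if_neg h0]
      rw [ih (i+1) L hdrop, htake]
      have : dividend = 0 := by omega
      simp [pvZ1, this]

def pvHasDiv (N x : Int) : Bool :=
  (PySem.List.pyRange 2 (N + 1) 1).any (fun d => decide (d < x) && decide (PySem.Int.mod x d = 0))
def pvZ (N x : Int) : Int := if pvHasDiv N x then 0 else x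

lemma pvHasDiv_succ (N x : Int) (hN : 2 ≤ N) :
    pvHasDiv N x = (pvHasDiv (N - 1) x || (decide (N < x) && decide (PySem.Int.mod x N = 0))) := by
  unfold pvHasDiv
  rw [show N + 1 = (N - 1 + 1) + 1 by ring, PySem.List.pyRange_one_succ_right (by omega)]
  rw [List.any_append]
  simp

lemma pvZ1_comp_pvZ (N x : Int) (hN : 2 ≤ N) :
    pvZ1 N (pvZ (N - 1) x) = pvZ N x := by
  unfold pvZ
  rw [pvHasDiv_succ N x hN]
  by_cases h : pvHasDiv (N - 1) x
  · simp [h, pvZ1]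
  · simp only [h, Bool.false_or]
    by_cases h2 : N < x ∧ PySem.Int.mod x N = 0
    · have hx0 : x ≠ 0 := by omega
      simp [h2.1, h2.2, pvZ1, hx0]
    · rcases Decidable.not_and_iff_or_not.mp h2 with h3 | h3 <;>
        simp [pvZ1, h3]

lemma pvHasDiv_iff (N x : Int) :
    pvHasDiv N x = true ↔ ∃ d, 2 ≤ d ∧ d ≤ N ∧ d < x ∧ d ∣ x := by
  unfold pvHasDiv
  rw [List.any_eq_true]
  constructor
  · rintro ⟨d, hmem, hcond⟩
    rw [PySem.List.mem_pyRange_one] at hmem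
    simp only [Bool.and_eq_true, decide_eq_true_eq] at hcond
    exact ⟨d, by omega, by omega, hcond.1, (PySem.Int.mod_eq_zero_iff_dvd x d).mp hcond.2⟩
  · rintro ⟨d, h2, hN', hlt, hdvd⟩
    refine ⟨d, PySem.List.mem_pyRange_one.mpr ⟨by omega, by omega⟩, ?_⟩
    simp only [Bool.and_eq_true, decide_eq_true_eq]
    exact ⟨hlt, (PySem.Int.mod_eq_zero_iff_dvd x d).mpr hdvd⟩

lemma pvTrial_false_iff (par2 x : Int) (d : Int) (hd : 2 ≤ d) :
    pvTrial par2 x d = false ↔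
      ∃ e, d ≤ e ∧ e ≤ par2 ∧ e * e ≤ x ∧ PySem.Int.mod x e = 0 := by
  by_cases hg : d ≤ par2 ∧ d * d ≤ x
  · rw [pvTrial, dif_pos hg]
    by_cases hm : PySem.Int.mod x d = 0
    · rw [if_pos hm]
      constructor
      · intro _; exact ⟨d, le_refl d, hg.1, hg.2, hm⟩
      · intro _; rfl
    · rw [if_neg hm, pvTrial_false_iff par2 x (d + 1) (by omega)]
      constructor
      · rintro ⟨e, h1, h2, h3, h4⟩; exact ⟨e, by omega, h2, h3, h4⟩
      · rintro ⟨e, h1, h2, h3, h4⟩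
        refine ⟨e, ?_, h2, h3, h4⟩
        rcases (by omega : d + 1 ≤ e ∨ e = d) with h | h
        · exact h
        · exact absurd (h ▸ h4) hm
  · rw [pvTrial, dif_neg hg]
    simp only [Bool.true_eq_false, false_iff]
    rintro ⟨e, h1, h2, h3, h4⟩
    rcases Decidable.not_and_iff_or_not.mp hg with h5 | h5
    · omega
    · have : d * d ≤ e * e := by nlinarith
      omega
termination_by (x + 1 - d).toNat
decreasing_by
  have hdx : d ≤ x := by nlinarith [hg.2]
  omega

lemma div_below_iff_sq (x : Int) (hx : 1 < x) (par2 : Int) :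
    (∃ d, 2 ≤ d ∧ d ≤ par2 ∧ d < x ∧ d ∣ x) ↔
      (∃ d, 2 ≤ d ∧ d ≤ par2 ∧ d * d ≤ x ∧ d ∣ x) := by
  constructor
  · rintro ⟨d, h2, hp, hlt, hdvd⟩
    obtain ⟨e, he⟩ := hdvd
    have he2 : 2 ≤ e := by nlinarith
    rcases le_total d e with h | h
    · exact ⟨d, h2, hp, by nlinarith, ⟨e, he⟩⟩
    · exact ⟨e, he2, by omega, by nlinarith, ⟨d, by linarith [he, mul_comm d e]⟩⟩
  · rintro ⟨d, h2, hp, hsq, hdvd⟩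
    exact ⟨d, h2, hp, by nlinarith, hdvd⟩

lemma cond_eq (par2 x : Int) :
    (decide (1 < x) && !pvHasDiv (1 + ((par2 - 1).toNat : Int)) x)
      = (decide (1 < x) && pvTrial par2 x 2) := by
  by_cases hx : 1 < x
  · simp only [decide_eq_true hx, Bool.true_and]
    have hbound : ∀ d : Int, 2 ≤ d → (d ≤ 1 + ((par2 - 1).toNat : Int) ↔ d ≤ par2) := by
      intro d hd; omega
    have h1 : pvHasDiv (1 + ((par2 - 1).toNat : Int)) x = true ↔
        ∃ d, 2 ≤ d ∧ d ≤ par2 ∧ d * d ≤ x ∧ PySem.Int.mod x d = 0 := by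
      rw [pvHasDiv_iff]
      constructor
      · rintro ⟨d, h2, h3, h4, h5⟩
        obtain ⟨e, a, b, c, dd⟩ :=
          (div_below_iff_sq x hx par2).mp ⟨d, h2, (hbound d h2).mp h3, h4, h5⟩
        exact ⟨e, a, b, c, (PySem.Int.mod_eq_zero_iff_dvd x e).mpr dd⟩
      · rintro ⟨d, h2, h3, h4, h5⟩
        obtain ⟨e, a, b, c, dd⟩ :=
          (div_below_iff_sq x hx par2).mpr ⟨d, h2, h3, h4, (PySem.Int.mod_eq_zero_iff_dvd x d).mp h5⟩
        exact ⟨e, a, (hbound e a).mpr b, c, dd⟩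
    have h2 := pvTrial_false_iff par2 x 2 (le_refl 2)
    cases hT : pvTrial par2 x 2 with
    | false =>
      obtain ⟨e, a, b, c, dd⟩ := h2.mp hT
      have hh : pvHasDiv (1 + ((par2 - 1).toNat : Int)) x = true := h1.mpr ⟨e, a, b, c, dd⟩
      rw [hh]; rfl
    | true =>
      have hh : pvHasDiv (1 + ((par2 - 1).toNat : Int)) x = false := by
        by_contra hcon
        obtain ⟨e, a, b, c, dd⟩ := h1.mp (by simpa using hcon)
        have := h2.mpr ⟨e, a, b, c, dd⟩
        rw [hT] at this; exact absurd this (by simp)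
      rw [hh]; rfl
  · simp [hx]

lemma loopA_eq_map (par3 : List Int) :
    ∀ n : Nat, (PySem.List.pyRange 2 (2 + (n : Int)) 1).foldl (fun l d => pvInnerA d l 0 l) par3
      = par3.map (pvZ (1 + (n : Int))) := by
  intro n
  induction n with
  | zero =>
    rw [show (2:Int) + ((0:Nat):Int) = 2 by norm_num, PySem.List.pyRange_one_eq_nil (by omega)]
    simp only [List.foldl_nil]
    have hid : ∀ x : Int, pvZ (1 + ((0:Nat):Int)) x = x := by
      intro x
      unfold pvZ pvHasDiv
      rw [show (1:Int) + ((0:Nat):Int) + 1 = 2 by norm_num, PySem.List.pyRange_one_eq_nil (by omega)]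
      simp
    symm
    calc par3.map (pvZ (1 + ((0:Nat):Int))) = par3.map id := List.map_congr_left (fun x _ => hid x)
      _ = par3 := List.map_id _
  | succ n ih =>
    rw [show (2:Int) + (((n+1):Nat):Int) = (2 + (n:Int)) + 1 by push_cast; ring,
        PySem.List.pyRange_one_succ_right (by omega), List.foldl_append]
    simp only [List.foldl_cons, List.foldl_nil]
    rw [ih]
    rw [pvInnerA_eq_map (2 + (n:Int)) (par3.map (pvZ (1 + (n:Int)))) 0 _ rfl]
    simp only [List.take_zero, List.nil_append, List.map_map]
    apply List.map_congr_left
    intro x _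
    have h := pvZ1_comp_pvZ (2 + (n:Int)) x (by omega)
    rw [show (2:Int) + (n:Int) - 1 = 1 + (n:Int) by ring] at h
    rw [show (1:Int) + (((n+1):Nat):Int) = 2 + (n:Int) by push_cast; ring]
    exact h

lemma foldl_filter_gt (l : List Int) (acc : List Int) :
    l.foldl (fun r x1 => if x1 > 1 then r ++ [x1] else r) acc
      = acc ++ l.filter (fun x => decide (1 < x)) := by
  induction l generalizing acc with
  | nil => simp
  | cons a t ih =>
    simp only [List.foldl_cons, List.filter_cons]
    by_cases h : (1:Int) < a
    · simp [h, ih, List.append_assoc]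
    · simp [h, ih]

lemma foldl_filter_B (par2 : Int) (l : List Int) (acc : List Int) :
    l.foldl (fun r x => if x > 1 then (if pvTrial par2 x 2 then r ++ [x] else r) else r) acc
      = acc ++ l.filter (fun x => decide (1 < x) && pvTrial par2 x 2) := by
  induction l generalizing acc with
  | nil => simp
  | cons a t ih =>
    simp only [List.foldl_cons, List.filter_cons]
    by_cases h : (1:Int) < a
    · by_cases ht : pvTrial par2 a 2
      · simp [h, ht, ih, List.append_assoc]
      · simp [h, ht, ih]
    · simp [h, ih]

lemma filter_map_pvZ (N : Int) (l : List Int) :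
    (l.map (pvZ N)).filter (fun x => decide (1 < x))
      = l.filter (fun x => decide (1 < x) && !pvHasDiv N x) := by
  induction l with
  | nil => simp
  | cons a t ih =>
    simp only [List.map_cons, List.filter_cons]
    by_cases h : pvHasDiv N a
    · simp [pvZ, h, ih]
    · simp [pvZ, h, ih]


-- ===== VERDICT (by name: the statement is the Claim_ definition above) =====
theorem prime_numbers_finder_spec : Claim_equal_prime_numbers_finder := by
  intro par1 par2 par3 _
  unfold Spec_prime_numbers_finder prime_numbers_finder prime_numbers_finder_alt
  have hr : par2 + 1 = 2 + ((par2 - 1).toNat : Int) ∨ (PySem.List.pyRange 2 (par2+1) 1 = [] ∧ PySem.List.pyRange 2 (2 + ((par2 - 1).toNat : Int)) 1 = []) := by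
    rcases (by omega : 2 ≤ par2 ∨ par2 < 2) with h | h
    · left; omega
    · right
      constructor <;> [exact PySem.List.pyRange_one_eq_nil (by omega); exact PySem.List.pyRange_one_eq_nil (by omega)]
  have hloop : (PySem.List.pyRange 2 (par2 + 1) 1).foldl (fun l d => pvInnerA d l 0 l) par3
      = par3.map (pvZ (1 + ((par2 - 1).toNat : Int))) := by
    rcases hr with h | ⟨h1, h2⟩
    · rw [h]; exact loopA_eq_map par3 (par2 - 1).toNat
    · rw [h1]
      have := loopA_eq_map par3 (par2 - 1).toNat
      rw [h2] at this
      exact this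
  simp only [hloop]
  rw [foldl_filter_gt, foldl_filter_B, List.nil_append, List.nil_append, filter_map_pvZ]
  apply List.filter_congr
  intro x _
  exact cond_eq par2 x
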